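-- pv_equiv track=rewrite | github.com/gronnmann/INF100 | uke6/uke_06_oppg_4.py | render_histogram
-- ===== SOURCE A (Python) =====
-- def render_histogram(values):
--     max_size = max(values)
--
--     buffer = ""
--
--     for i in range(max_size):
--         for j in values:
--             to_draw = max_size - j  # dersom høgde er 5 og max 10 - bør være mellomrom de første 5 verdiane, så stjerne dei neste 5
--
--             if i >= to_draw:
--                 buffer += "*"
--             else:
--                 buffer += " "
--
--         buffer += "\n"
--
--     return buffer.rstrip("\n") #fjern siste \n
-- ===== SOURCE B (Python) =====
-- def render_histogram(values):
--     max_size = max(values)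
--     cols = [' ' * (max_size - j) + '*' * j for j in values]
--     rows = [''.join(col[i] for col in cols) for i in range(max_size)]
--     return '\n'.join(rows)
-- ===== Notes on version B (the rewrite author's own statement) =====
-- stated objective: alternative
-- what changed: Replaces the row-major cell-by-cell conditional string concatenation with a column-first construction: each value's column is built in closed form by string repetition (' '*(max_size-j)+'*'*j), rows are read off by indexing the columns, and the result is assembled with '\n'.join instead of appending and rstrip-ing a trailing newline.
-- outside the precondition, e.g. on render_histogram([]): A raises ValueError, B raises ValueError
import Mathlib
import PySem

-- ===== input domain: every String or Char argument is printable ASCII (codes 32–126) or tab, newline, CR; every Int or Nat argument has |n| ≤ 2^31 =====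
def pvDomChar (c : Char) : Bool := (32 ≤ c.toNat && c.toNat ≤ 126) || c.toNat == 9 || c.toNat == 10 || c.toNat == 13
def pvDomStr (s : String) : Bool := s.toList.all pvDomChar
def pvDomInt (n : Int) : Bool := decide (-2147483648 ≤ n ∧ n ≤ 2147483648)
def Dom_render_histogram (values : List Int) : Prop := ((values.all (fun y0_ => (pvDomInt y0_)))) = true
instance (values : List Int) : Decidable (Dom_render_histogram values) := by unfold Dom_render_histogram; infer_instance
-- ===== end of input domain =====

-- B replaces A's row-major cell-by-cell conditional with a column-first construction
-- (closed-form repetition per column, then a transpose read and '\n'.join): an alternative decomposition of the same cost.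


-- ===== PORT A =====
-- buffer.rstrip("\n"): drop trailing '\n' characters — hand port (PySem has no rstrip-with-chars), exact.
def pvRstripNL (cs : List Char) : List Char :=
  (cs.reverse.dropWhile (· == '\n')).reverse

def render_histogram (values : List Int) : String :=
  -- max(values): Pre_ excludes [], where Python raises ValueError; getD 0 is never used under Pre_
  let max_size := (PySem.List.max? values (fun x => x)).getD 0
  let buffer : List Char :=
    (PySem.List.pyRange 0 max_size 1).foldl (fun buf i =>
      (values.foldl (fun b j =>
        b ++ (if i ≥ max_size - j then ['*'] else [' '])) buf) ++ ['\n']) []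
  String.mk (pvRstripNL buffer)

-- ===== PORT B =====
def render_histogram_alt (values : List Int) : String :=
  let max_size := (PySem.List.max? values (fun x => x)).getD 0
  -- ' ' * (max_size - j) + '*' * j  (Python repetition clamps negative counts to 0, as .toNat does)
  let cols : List (List Char) :=
    values.map (fun j => List.replicate (max_size - j).toNat ' ' ++ List.replicate j.toNat '*')
  -- col[i] is always in range in Source B (every column has length ≥ max_size); getD's default is never used
  let rows : List (List Char) :=
    (PySem.List.pyRange 0 max_size 1).map (fun i =>
      PySem.Chars.join [] (cols.map (fun c => [c.getD i.toNat ' '])))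
  String.mk (PySem.Chars.join ['\n'] rows)

-- ===== PRECONDITION & SPEC =====
-- Pre_ excludes only the empty list, on which Python's max([]) raises ValueError (in A and in B alike).
def Pre_render_histogram (values : List Int) : Prop := values ≠ []
instance (values : List Int) : Decidable (Pre_render_histogram values) := by
  unfold Pre_render_histogram; infer_instance

def pvWitness_render_histogram : List Int := [3, -2, 0, 1]

def Spec_render_histogram (values : List Int) (out : String) : Prop := out = render_histogram_alt values
instance (values : List Int) (out : String) : Decidable (Spec_render_histogram values out) := by
  unfold Spec_render_histogram; infer_instance

-- ===== CLAIM (what is proved, stated in full; the proofs are below) =====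
def Claim_equal_render_histogram : Prop := ∀ (values : List Int), Dom_render_histogram values → Pre_render_histogram values → Spec_render_histogram values (render_histogram values)

-- ===== LEMMAS AND PROOFS =====

-- A's cell character equals B's column character, for a row index 0 ≤ i < m and a value j ≤ m.
lemma cell_eq (m i j : Int) (hi0 : 0 ≤ i) (him : i < m) (hjm : j ≤ m) :
    (if i ≥ m - j then '*' else ' ')
      = (List.replicate (m - j).toNat ' ' ++ List.replicate j.toNat '*').getD i.toNat ' ' := by
  rcases le_or_gt j 0 with hj | hj
  · have h1 : ¬ i ≥ m - j := by omega
    have h2 : i.toNat < (m - j).toNat := by omega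
    simp [h1, List.getD, List.getElem?_append_left, h2]
  · by_cases h : i ≥ m - j
    · have h2 : ¬ i.toNat < (m - j).toNat := by omega
      have h3 : i.toNat - (m - j).toNat < j.toNat := by omega
      simp [h, List.getD, List.getElem?_append_right, h2, Nat.le_of_not_lt, h3]
    · have h2 : i.toNat < (m - j).toNat := by omega
      simp [h, List.getD, List.getElem?_append_left, h2]

-- ''.join over singleton pieces is the identity on the list of characters.
lemma join_nil_map {α : Type} (g : α → Char) (l : List α) :
    PySem.Chars.join [] (l.map (fun x => [g x])) = l.map g := by
  have := PySem.Chars.join_nil_singletons (l.map g)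
  simpa [List.map_map] using this

-- Removing the trailing newlines of flatten (rows.map (· ++ ['\n'])) yields '\n'.join rows,
-- provided every row is nonempty and newline-free.
lemma rstrip_flatten (rows : List (List Char))
    (h : ∀ r ∈ rows, r ≠ [] ∧ '\n' ∉ r) :
    pvRstripNL ((rows.map (fun r => r ++ ['\n'])).flatten) = PySem.Chars.join ['\n'] rows := by
  unfold pvRstripNL
  suffices hs : ((rows.map (fun r => r ++ ['\n'])).flatten).reverse.dropWhile (· == '\n')
      = (PySem.Chars.join ['\n'] rows).reverse by
    rw [hs, List.reverse_reverse]
  induction rows with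
  | nil => simp [PySem.Chars.join, List.intercalate]
  | cons r rest ih =>
    obtain ⟨hr, hnl⟩ := h r (List.mem_cons_self)
    have hdrop : r.reverse.dropWhile (· == '\n') = r.reverse := by
      cases hrev : r.reverse with
      | nil => simp
      | cons c t =>
        have hc : c ∈ r := by
          have : c ∈ r.reverse := by rw [hrev]; exact List.mem_cons_self
          simpa using this
        have : (c == '\n') = false := by
          simp only [beq_eq_false_iff_ne]; intro hEq; exact hnl (hEq ▸ hc)
        simp [this]
    cases rest with
    | nil =>
      simp [PySem.Chars.join_singleton, hdrop]
    | cons s rest' =>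
      have ih' := ih (fun x hx => h x (List.mem_cons_of_mem r hx))
      have hs0 := h s (List.mem_cons_of_mem r List.mem_cons_self)
      have hjoin_ne : PySem.Chars.join ['\n'] (s :: rest') ≠ [] := by
        cases rest' with
        | nil => simpa [PySem.Chars.join_singleton] using hs0.1
        | cons q t => simp [PySem.Chars.join_cons_cons]
      rw [List.map_cons, List.flatten_cons, List.reverse_append, List.dropWhile_append, ih']
      have : ((PySem.Chars.join ['\n'] (s :: rest')).reverse).isEmpty = false := by
        simpa [List.isEmpty_iff] using hjoin_ne
      rw [this]
      simp [PySem.Chars.join_cons_cons]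

-- Main agreement, stated over the shared max value m.
lemma agree (values : List Int) (m : Int)
    (hmax : PySem.List.max? values (fun x => x) = some m) :
    render_histogram values = render_histogram_alt values := by
  have hle : ∀ j ∈ values, j ≤ m := PySem.List.max?_isMax hmax
  simp only [render_histogram, render_histogram_alt, hmax, Option.getD_some]
  rcases le_or_gt m 0 with hm | hm
  · rw [PySem.List.pyRange_one_eq_nil hm]
    simp [pvRstripNL, PySem.Chars.join, List.intercalate]
  · apply congrArg
    -- rewrite A's outer fold into flatten of rows, using cell_eq inside the range
    have hrow : ∀ (buf : List Char), ∀ i ∈ PySem.List.pyRange 0 m 1,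
        (values.foldl (fun b j => b ++ (if i ≥ m - j then ['*'] else [' '])) buf) ++ ['\n']
        = buf ++ ((values.map (fun j =>
            (List.replicate (m - j).toNat ' ' ++ List.replicate j.toNat '*').getD i.toNat ' ')) ++ ['\n']) := by
      intro buf i hi
      rw [PySem.List.mem_pyRange_one] at hi
      have : values.foldl (fun b j => b ++ (if i ≥ m - j then ['*'] else [' '])) buf
          = buf ++ values.map (fun j =>
              (List.replicate (m - j).toNat ' ' ++ List.replicate j.toNat '*').getD i.toNat ' ') := by
        rw [PySem.List.foldl_congr_mem values _
              (fun b j => b ++ [(List.replicate (m - j).toNat ' ' ++ List.replicate j.toNat '*').getD i.toNat ' ']) buf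
              (by
                intro acc j hj
                rw [show (if i ≥ m - j then ['*'] else [' '])
                      = [(List.replicate (m - j).toNat ' ' ++ List.replicate j.toNat '*').getD i.toNat ' '] by
                    rw [← cell_eq m i j hi.1 hi.2 (hle j hj)]
                    split <;> rfl])]
        exact PySem.List.foldl_append_singleton_eq_map _ _ _
      rw [this, List.append_assoc]
    rw [PySem.List.foldl_congr_mem _ _ _ _ hrow,
        PySem.List.foldl_append_eq_flatMap, List.nil_append, List.flatMap_def]
    -- now A's buffer is flatten (rows.map (· ++ ['\n'])); apply the rstrip lemma
    rw [show (PySem.List.pyRange 0 m 1).map (fun i =>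
          (values.map (fun j =>
            (List.replicate (m - j).toNat ' ' ++ List.replicate j.toNat '*').getD i.toNat ' ')) ++ ['\n'])
        = ((PySem.List.pyRange 0 m 1).map (fun i =>
            values.map (fun j =>
              (List.replicate (m - j).toNat ' ' ++ List.replicate j.toNat '*').getD i.toNat ' '))).map
            (fun r => r ++ ['\n']) by rw [List.map_map]; rfl]
    rw [rstrip_flatten]
    · apply congrArg
      apply List.map_congr_left
      intro i hi
      rw [List.map_map]
      exact (join_nil_map _ _).symm
    · intro r hr
      simp only [List.mem_map] at hr
      obtain ⟨i, hi, rfl⟩ := hr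
      constructor
      · have : values ≠ [] := by
          intro hv; rw [hv] at hmax; simp [PySem.List.max?] at hmax
        simpa using this
      · intro hmem
        simp only [List.mem_map] at hmem
        obtain ⟨j, hj, hc⟩ := hmem
        have hsp : (List.replicate (m - j).toNat ' ' ++ List.replicate j.toNat '*').getD i.toNat ' ' = ' '
            ∨ (List.replicate (m - j).toNat ' ' ++ List.replicate j.toNat '*').getD i.toNat ' ' = '*' := by
          rw [List.getD_eq_getElem?_getD]
          rcases hx : (List.replicate (m - j).toNat ' ' ++ List.replicate j.toNat '*')[i.toNat]? with _ | c
          · simp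
          · have hcm := List.mem_of_getElem? hx
            rcases List.mem_append.mp hcm with h1 | h1
            · simp [List.eq_of_mem_replicate h1]
            · simp [List.eq_of_mem_replicate h1]
        rw [hc] at hsp
        rcases hsp with h | h <;> exact absurd h (by decide)

-- ===== VERDICT (by name: the statement is the Claim_ definition above) =====
theorem render_histogram_spec : Claim_equal_render_histogram := by
  intro values _ hpre
  unfold Spec_render_histogram
  rcases hmax : PySem.List.max? values (fun x => x) with _ | m
  · exact absurd ((PySem.List.max?_eq_none_iff _ _).mp hmax) hpre
  · exact agree values m hmax
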